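-- pv_equiv track=rewrite | github.com/exelearning/iteexe | exe/webui/outlinepane.py | encode2nicexml
-- ===== SOURCE A (Python) =====
-- def encode2nicexml(string):
--     """
--     Turns & into &amp; etc
--     """
--     map = [('&', '&amp;'),
--            ('"', '&quot;'),
--            ("'", '&apos;'),
--            ('<', '&lt;'),
--            ('>', '&gt;')]
--     for src, dest in map:
--         string = string.replace(src, dest)
--     return string
-- ===== SOURCE B (Python) =====
-- _ESC = {'&': '&amp;', '"': '&quot;', "'": '&apos;', '<': '&lt;', '>': '&gt;'}
--
-- def encode2nicexml(string):
--     """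
--     Turns & into &amp; etc
--     """
--     return ''.join(_ESC.get(c, c) for c in string)
-- ===== Notes on version B (the rewrite author's own statement) =====
-- stated objective: idiomatic
-- what changed: Replaces five sequential whole-string .replace passes with a single character-level pass joining dict lookups (each character mapped independently, no re-scanning of already-substituted text).
import Mathlib
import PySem

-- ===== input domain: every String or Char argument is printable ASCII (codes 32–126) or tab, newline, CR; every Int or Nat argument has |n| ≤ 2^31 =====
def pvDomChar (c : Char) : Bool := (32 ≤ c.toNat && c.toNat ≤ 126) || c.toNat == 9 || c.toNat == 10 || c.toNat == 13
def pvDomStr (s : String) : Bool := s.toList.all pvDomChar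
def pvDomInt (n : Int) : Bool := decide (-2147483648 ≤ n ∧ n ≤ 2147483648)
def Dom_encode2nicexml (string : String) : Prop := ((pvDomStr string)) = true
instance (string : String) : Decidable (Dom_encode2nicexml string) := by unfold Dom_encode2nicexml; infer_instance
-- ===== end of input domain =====

-- B replaces A's five sequential whole-string replace passes by one character-level
-- pass with a dict lookup per character (idiomatic; same result, each char maps independently).

-- ===== PORT A =====
def encode2nicexml (string : String) : String :=
  [("&", "&amp;"), ("\"", "&quot;"), ("'", "&apos;"), ("<", "&lt;"), (">", "&gt;")].foldl
    (fun s p => PySem.Str.replace s p.1 p.2) string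

-- ===== PORT B =====
def escMap : PySem.Dict Char String :=
  PySem.Dict.ofList [('&', "&amp;"), ('"', "&quot;"), ('\'', "&apos;"), ('<', "&lt;"), ('>', "&gt;")]

def encode2nicexml_alt (string : String) : String :=
  PySem.Str.join "" (string.toList.map (fun c => escMap.getD c (String.ofList [c])))

-- ===== PRECONDITION & SPEC =====
def Spec_encode2nicexml (string : String) (out : String) : Prop := out = encode2nicexml_alt string
instance (string : String) (out : String) : Decidable (Spec_encode2nicexml string out) := by unfold Spec_encode2nicexml; infer_instance

-- ===== CLAIM (what is proved, stated in full; the proofs are below) =====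
def Claim_equal_encode2nicexml : Prop := ∀ (string : String), Dom_encode2nicexml string → Spec_encode2nicexml string (encode2nicexml string)

-- ===== LEMMAS AND PROOFS =====

-- replace with a single-character pattern is a per-character flatMap
theorem replace_go_single (a : Char) (new : List Char) (l acc : List Char) (fuel : Nat)
    (h : l.length ≤ fuel) :
    PySem.Chars.replace.go [a] new fuel l acc
      = acc.reverse ++ l.flatMap (fun c => if c = a then new else [c]) := by
  induction l generalizing fuel acc with
  | nil => cases fuel <;> simp [PySem.Chars.replace.go]
  | cons c t ih =>
    cases fuel with
    | zero => simp at h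
    | succ fuel =>
      simp only [List.length_cons, Nat.succ_le_succ_iff] at h
      by_cases hc : c = a
      · subst hc
        have hp : [c].isPrefixOf (c :: t) = true := by simp [List.isPrefixOf]
        simp only [PySem.Chars.replace.go, hp, if_pos, List.length_cons, List.length_nil]
        have hd : List.drop (0 + 1) (c :: t) = t := rfl
        rw [hd, ih _ _ h]
        simp
      · have hp : [a].isPrefixOf (c :: t) = false := by
          simp [List.isPrefixOf]; exact fun h' => (hc h'.symm).elim
        simp only [PySem.Chars.replace.go, hp, Bool.false_eq_true, if_false]
        rw [ih _ _ h]
        simp [hc]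

theorem replace_single (s : List Char) (a : Char) (new : List Char) :
    PySem.Chars.replace s [a] new = s.flatMap (fun c => if c = a then new else [c]) := by
  have : ([a] : List Char).isEmpty = false := rfl
  rw [PySem.Chars.replace, this]
  simpa using replace_go_single a new s [] s.length (le_refl _)

-- the per-character function B computes
def escF (c : Char) : List Char := (escMap.getD c (String.ofList [c])).toList

theorem pointwise (x : Char) :
    List.flatMap
        (fun x =>
          List.flatMap
            (fun x =>
              List.flatMap
                (fun x =>
                  List.flatMap (fun c => if c = '>' then "&gt;".toList else [c])
                    (if x = '<' then "&lt;".toList else [x]))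
                (if x = '\'' then "&apos;".toList else [x]))
            (if x = '"' then "&quot;".toList else [x]))
        (if x = '&' then "&amp;".toList else [x]) = escF x := by
  by_cases h1 : x = '&'; · subst h1; decide
  by_cases h2 : x = '"'; · subst h2; decide
  by_cases h3 : x = '\''; · subst h3; decide
  by_cases h4 : x = '<'; · subst h4; decide
  by_cases h5 : x = '>'; · subst h5; decide
  simp only [if_neg h1, List.flatMap_singleton, if_neg h2, if_neg h3, if_neg h4, if_neg h5]
  have hmk : escMap = PySem.Dict.mk [('&', "&amp;"), ('"', "&quot;"), ('\'', "&apos;"),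
      ('<', "&lt;"), ('>', "&gt;")] := by decide
  simp [escF, hmk, PySem.Dict.getD, PySem.Dict.get?_mk_cons, PySem.Dict.get?,
    Ne.symm h1, Ne.symm h2, Ne.symm h3, Ne.symm h4, Ne.symm h5]

theorem join_nil_eq_flatten (xs : List (List Char)) :
    PySem.Chars.join [] xs = xs.flatten := by
  induction xs with
  | nil => rfl
  | cons x t ih =>
    cases t with
    | nil => simp [PySem.Chars.join, List.intercalate]
    | cons y t' => rw [PySem.Chars.join_cons_cons, ih]; simp

-- ===== VERDICT (by name: the statement is the Claim_ definition above) =====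
theorem encode2nicexml_spec : Claim_equal_encode2nicexml := by
  intro s _
  show _ = _
  unfold encode2nicexml encode2nicexml_alt
  simp only [List.foldl_cons, List.foldl_nil, PySem.Str.replace, PySem.Str.join,
    String.toList_ofList]
  rw [String.ofList_inj]
  rw [show ("&".toList) = ['&'] from rfl, show ("\"".toList) = ['"'] from rfl,
    show ("'".toList) = ['\''] from rfl, show ("<".toList) = ['<'] from rfl,
    show (">".toList) = ['>'] from rfl, show ("".toList) = ([] : List Char) from rfl]
  rw [replace_single, replace_single, replace_single, replace_single, replace_single]
  simp only [List.flatMap_assoc]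
  rw [join_nil_eq_flatten, List.map_map, ← List.flatMap_def]
  exact congrArg (List.flatMap · s.toList) (funext pointwise)
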